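-- pv_equiv track=rewrite | github.com/openverse-orca/OrcaGym | examples/legged_gym/scripts/sb3_ppo_vecenv_rl.py | generate_env_list
-- ===== SOURCE A (Python) =====
-- def generate_env_list(orcagym_addresses, subenv_num):
--     orcagym_addr_list = []
--     env_index_list = []
--     is_subenv_list = []
--
--     for orcagym_addr in orcagym_addresses:
--         for i in range(subenv_num):
--             orcagym_addr_list.append(orcagym_addr)
--             env_index_list.append(i)
--             is_subenv_list.append(False if i == 0 else True)
--
--     return orcagym_addr_list, env_index_list, is_subenv_list
-- ===== SOURCE B (Python) =====
-- def generate_env_list(orcagym_addresses, subenv_num):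
--     if subenv_num <= 0:
--         return [], [], []
--     total = len(orcagym_addresses) * subenv_num
--     orcagym_addr_list = []
--     env_index_list = []
--     is_subenv_list = []
--     for t in range(total):
--         q, r = divmod(t, subenv_num)
--         orcagym_addr_list.append(orcagym_addresses[q])
--         env_index_list.append(r)
--         is_subenv_list.append(r != 0)
--     return orcagym_addr_list, env_index_list, is_subenv_list
-- ===== Notes on version B (the rewrite author's own statement) =====
-- stated objective: alternative
-- what changed: Replaces A's nested loop over addresses x subenv indices with one flat loop over the total count 0..len(addresses)*subenv_num, recovering the address position and subenv index of each slot arithmetically with divmod.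
import Mathlib
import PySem

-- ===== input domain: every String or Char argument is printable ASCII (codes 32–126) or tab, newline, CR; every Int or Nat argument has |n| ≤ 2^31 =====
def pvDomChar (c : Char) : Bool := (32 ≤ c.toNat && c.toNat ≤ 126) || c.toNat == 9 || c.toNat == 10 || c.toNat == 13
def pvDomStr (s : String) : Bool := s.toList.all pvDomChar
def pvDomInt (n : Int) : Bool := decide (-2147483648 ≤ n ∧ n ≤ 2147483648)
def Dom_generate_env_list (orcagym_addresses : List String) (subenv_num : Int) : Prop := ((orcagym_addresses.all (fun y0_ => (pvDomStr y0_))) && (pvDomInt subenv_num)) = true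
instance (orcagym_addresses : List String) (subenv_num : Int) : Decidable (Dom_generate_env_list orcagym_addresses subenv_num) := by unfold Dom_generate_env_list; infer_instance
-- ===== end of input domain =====

-- B walks one flat loop over the total slot count and recovers address position and subenv index with divmod, instead of A's nested loops; objective: alternative (same cost).


-- ===== PORT A =====
def generate_env_list (orcagym_addresses : List String) (subenv_num : Int) : List String × List Int × List Bool :=
  orcagym_addresses.foldl
    (fun st addr =>
      (PySem.List.pyRange 0 subenv_num 1).foldl
        (fun st i =>
          (st.1 ++ [addr], st.2.1 ++ [i], st.2.2 ++ [if i == 0 then false else true]))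
        st)
    ([], [], [])

-- ===== PORT B =====
def generate_env_list_alt (orcagym_addresses : List String) (subenv_num : Int) : List String × List Int × List Bool :=
  if subenv_num ≤ 0 then ([], [], [])
  else
    (PySem.List.pyRange 0 ((orcagym_addresses.length : Int) * subenv_num) 1).foldl
      (fun st t =>
        let q := PySem.Int.floordiv t subenv_num
        let r := PySem.Int.mod t subenv_num
        -- orcagym_addresses[q]: q is in range for every t of the loop, so getD's default is never used
        (st.1 ++ [(PySem.List.pyGet? orcagym_addresses q).getD ""],
         st.2.1 ++ [r],
         st.2.2 ++ [decide (r ≠ 0)]))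
      ([], [], [])

-- ===== PRECONDITION & SPEC =====
def Spec_generate_env_list (orcagym_addresses : List String) (subenv_num : Int) (out : List String × List Int × List Bool) : Prop := out = generate_env_list_alt orcagym_addresses subenv_num
instance (orcagym_addresses : List String) (subenv_num : Int) (out : List String × List Int × List Bool) : Decidable (Spec_generate_env_list orcagym_addresses subenv_num out) := by unfold Spec_generate_env_list; infer_instance

-- ===== CLAIM =====
def Claim_equal_generate_env_list : Prop := ∀ (orcagym_addresses : List String) (subenv_num : Int), Dom_generate_env_list orcagym_addresses subenv_num → Spec_generate_env_list orcagym_addresses subenv_num (generate_env_list orcagym_addresses subenv_num)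

-- ===== LEMMAS AND PROOFS =====

-- a fold that appends one element to each of three accumulators is three maps
lemma triple_foldl {α : Type} (L : List α) (f : α → String) (g : α → Int) (h : α → Bool)
    (st : List String × List Int × List Bool) :
    L.foldl (fun st x => (st.1 ++ [f x], st.2.1 ++ [g x], st.2.2 ++ [h x])) st
      = (st.1 ++ L.map f, st.2.1 ++ L.map g, st.2.2 ++ L.map h) := by
  induction L generalizing st with
  | nil => simp
  | cons x xs ih =>
      rw [List.foldl_cons, ih]
      obtain ⟨a, b, c⟩ := st
      simp

-- A's nested loops in closed form
lemma portA_closed (addrs : List String) (k : Int) :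
    generate_env_list addrs k
      = (addrs.flatMap (fun a => (PySem.List.pyRange 0 k 1).map (fun _ => a)),
         (List.replicate addrs.length (PySem.List.pyRange 0 k 1)).flatten,
         (List.replicate addrs.length ((PySem.List.pyRange 0 k 1).map (fun i => decide (i ≠ 0)))).flatten) := by
  unfold generate_env_list
  have hbody : ∀ (st : List String × List Int × List Bool) (addr : String),
      (PySem.List.pyRange 0 k 1).foldl
        (fun st i => (st.1 ++ [addr], st.2.1 ++ [i], st.2.2 ++ [if i == 0 then false else true])) st
        = (st.1 ++ (PySem.List.pyRange 0 k 1).map (fun _ => addr),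
           st.2.1 ++ PySem.List.pyRange 0 k 1,
           st.2.2 ++ (PySem.List.pyRange 0 k 1).map (fun i => decide (i ≠ 0))) := by
    intro st addr
    rw [triple_foldl (h := fun i => if i == 0 then false else true)]
    have hmap : (PySem.List.pyRange 0 k 1).map (fun i => if i == 0 then false else true)
        = (PySem.List.pyRange 0 k 1).map (fun i => decide (i ≠ 0)) :=
      List.map_congr_left (fun i _ => by by_cases hi : i = 0 <;> simp [hi])
    rw [hmap, List.map_id']
  suffices H : ∀ (st : List String × List Int × List Bool),
      addrs.foldl (fun st addr =>
          (PySem.List.pyRange 0 k 1).foldl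
            (fun st i => (st.1 ++ [addr], st.2.1 ++ [i], st.2.2 ++ [if i == 0 then false else true])) st) st
        = (st.1 ++ addrs.flatMap (fun a => (PySem.List.pyRange 0 k 1).map (fun _ => a)),
           st.2.1 ++ (List.replicate addrs.length (PySem.List.pyRange 0 k 1)).flatten,
           st.2.2 ++ (List.replicate addrs.length ((PySem.List.pyRange 0 k 1).map (fun i => decide (i ≠ 0)))).flatten) by
    simpa using H ([], [], [])
  induction addrs with
  | nil => simp
  | cons a as ih =>
      intro st
      rw [List.foldl_cons, hbody, ih]
      simp [List.replicate_succ]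

-- B's flat loop in the same closed form (k > 0)
lemma portB_flat (k : Int) (hk : 0 < k) (addrs : List String)
    (st : List String × List Int × List Bool) :
    (PySem.List.pyRange 0 ((addrs.length : Int) * k) 1).foldl
      (fun st t =>
        (st.1 ++ [(PySem.List.pyGet? addrs (PySem.Int.floordiv t k)).getD ""],
         st.2.1 ++ [PySem.Int.mod t k],
         st.2.2 ++ [decide (PySem.Int.mod t k ≠ 0)])) st
      = (st.1 ++ addrs.flatMap (fun a => (PySem.List.pyRange 0 k 1).map (fun _ => a)),
         st.2.1 ++ (List.replicate addrs.length (PySem.List.pyRange 0 k 1)).flatten,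
         st.2.2 ++ (List.replicate addrs.length ((PySem.List.pyRange 0 k 1).map (fun i => decide (i ≠ 0)))).flatten) := by
  induction addrs using List.reverseRecOn generalizing st with
  | nil => simp
  | append_singleton as a ih =>
      have hk' : (0:Int) ≤ k := le_of_lt hk
      have hM0 : (0:Int) ≤ (as.length : Int) * k := mul_nonneg (Int.natCast_nonneg _) hk'
      have hB : (((as ++ [a]).length : Int) * k) = (as.length : Int) * k + k := by
        simp
        ring
      rw [hB, PySem.List.pyRange_one_append 0 ((as.length : Int) * k) ((as.length : Int) * k + k)
            hM0 (by omega), List.foldl_append]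
      have hcongr1 : ∀ init : List String × List Int × List Bool,
          (PySem.List.pyRange 0 ((as.length : Int) * k) 1).foldl
            (fun st t =>
              (st.1 ++ [(PySem.List.pyGet? (as ++ [a]) (PySem.Int.floordiv t k)).getD ""],
               st.2.1 ++ [PySem.Int.mod t k],
               st.2.2 ++ [decide (PySem.Int.mod t k ≠ 0)])) init
          = (PySem.List.pyRange 0 ((as.length : Int) * k) 1).foldl
            (fun st t =>
              (st.1 ++ [(PySem.List.pyGet? as (PySem.Int.floordiv t k)).getD ""],
               st.2.1 ++ [PySem.Int.mod t k],
               st.2.2 ++ [decide (PySem.Int.mod t k ≠ 0)])) init := by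
        intro init
        apply PySem.List.foldl_congr_mem
        intro acc t ht
        rw [PySem.List.mem_pyRange_one] at ht
        have hdiv : PySem.Int.floordiv t k = t / k := PySem.Int.floordiv_eq_ediv_of_pos hk
        have hq0 : 0 ≤ PySem.Int.floordiv t k := by rw [hdiv]; exact Int.ediv_nonneg ht.1 hk'
        have hqlt : PySem.Int.floordiv t k < (as.length : Int) := by
          rw [PySem.Int.floordiv_lt_iff_lt_mul hk]
          exact ht.2
        have hcast : (PySem.Int.floordiv t k).toNat < as.length := by omega
        rw [PySem.List.pyGet?_of_nonneg (as ++ [a]) hq0, PySem.List.pyGet?_of_nonneg as hq0,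
            List.getElem?_append_left hcast]
      rw [hcongr1, ih]
      have hrange2 : PySem.List.pyRange ((as.length : Int) * k) ((as.length : Int) * k + k) 1
          = (List.range k.toNat).map (fun (j : Nat) => (as.length : Int) * k + (j : Int)) := by
        have ht : ((as.length : Int) * k + k - (as.length : Int) * k).toNat = k.toNat := by omega
        rw [PySem.List.pyRange_one, ht]
      rw [hrange2, List.foldl_map]
      have hcongr2 : ∀ init : List String × List Int × List Bool,
          (List.range k.toNat).foldl
            (fun st (j : Nat) =>
              (st.1 ++ [(PySem.List.pyGet? (as ++ [a])
                  (PySem.Int.floordiv ((as.length : Int) * k + (j : Int)) k)).getD ""],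
               st.2.1 ++ [PySem.Int.mod ((as.length : Int) * k + (j : Int)) k],
               st.2.2 ++ [decide (PySem.Int.mod ((as.length : Int) * k + (j : Int)) k ≠ 0)])) init
          = (List.range k.toNat).foldl
            (fun st (j : Nat) =>
              (st.1 ++ [a], st.2.1 ++ [(j : Int)], st.2.2 ++ [decide ((j : Int) ≠ 0)])) init := by
        intro init
        apply PySem.List.foldl_congr_mem
        intro acc j hj
        rw [List.mem_range] at hj
        have hjk : (j : Int) < k := by omega
        have hfloor : PySem.Int.floordiv ((as.length : Int) * k + (j : Int)) k = (as.length : Int) := by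
          rw [PySem.Int.floordiv_eq_iff_of_pos hk]
          constructor
          · omega
          · nlinarith [Int.natCast_nonneg j]
        have hmod : PySem.Int.mod ((as.length : Int) * k + (j : Int)) k = (j : Int) := by
          have h1 := PySem.Int.floordiv_mul_add_mod ((as.length : Int) * k + (j : Int)) k
          rw [hfloor] at h1
          omega
        have hget : PySem.List.pyGet? (as ++ [a]) ((as.length : Int)) = some a := by
          rw [PySem.List.pyGet?_of_nonneg (as ++ [a]) (Int.natCast_nonneg _)]
          simp
        rw [hfloor, hmod, hget]
        rfl
      rw [hcongr2, triple_foldl]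
      have hpr : PySem.List.pyRange 0 k 1 = (List.range k.toNat).map (fun (j : Nat) => (j : Int)) := by
        have ht : (k - 0).toNat = k.toNat := by omega
        rw [PySem.List.pyRange_one, ht]
        exact List.map_congr_left (fun j _ => zero_add _)
      rw [hpr]
      simp only [List.map_map, List.flatMap_append, List.length_append, List.length_singleton,
        List.replicate_succ', List.flatten_append, List.flatten_cons, List.flatten_nil,
        List.append_nil, List.flatMap_singleton, List.append_assoc]
      rfl

-- ===== VERDICT =====
theorem generate_env_list_spec : Claim_equal_generate_env_list := by
  intro addrs k _
  unfold Spec_generate_env_list generate_env_list_alt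
  rw [portA_closed]
  by_cases hk : k ≤ 0
  · simp [hk, PySem.List.pyRange_one_eq_nil hk]
  · push_neg at hk
    rw [if_neg (by omega)]
    rw [portB_flat k hk addrs ([], [], [])]
    simp
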